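-- pv_equiv track=rewrite | github.com/Bulmenisaurus/python_projects | src/Popular2Letters.py | find_letters
-- ===== SOURCE A (Python) =====
-- def find_letters(find_input):
--     find_letters_dict = {}
--     for x in find_input:
--         if len(x) >= 3:  # words have to be longer or equal to 3 letters
--             for i in range(len(x) - 1):  # goes through each combination
--                 if x[i:i + 2] in find_letters_dict:
--                     find_letters_dict[x[i:i + 2]] += 1
--                 else:
--                     find_letters_dict[x[i:i + 2]] = 1
--     return find_letters_dict
-- ===== SOURCE B (Python) =====
-- def find_letters(find_input):
--     # Divide and conquer: count each half recursively, then merge the two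
--     # count dictionaries by adding values (new keys of the right half append,
--     # so first-occurrence key order is preserved).  The base case counts one
--     # word by pairing each character with its successor via zip.
--     if not find_input:
--         return {}
--     if len(find_input) == 1:
--         word = find_input[0]
--         counts = {}
--         if len(word) >= 3:
--             for a, b in zip(word, word[1:]):
--                 counts[a + b] = counts.get(a + b, 0) + 1
--         return counts
--     mid = len(find_input) // 2
--     left = find_letters(find_input[:mid])
--     for pair, n in find_letters(find_input[mid:]).items():
--         left[pair] = left.get(pair, 0) + n
--     return left
-- ===== Notes on version B (the rewrite author's own statement) =====
-- stated objective: alternative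
-- what changed: Replaces A's single accumulating dict scan with a divide-and-conquer recursion: each half of the word list is counted recursively and the two count dicts are merged by adding values, with the base case pairing adjacent characters via zip instead of index slicing.
import Mathlib
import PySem

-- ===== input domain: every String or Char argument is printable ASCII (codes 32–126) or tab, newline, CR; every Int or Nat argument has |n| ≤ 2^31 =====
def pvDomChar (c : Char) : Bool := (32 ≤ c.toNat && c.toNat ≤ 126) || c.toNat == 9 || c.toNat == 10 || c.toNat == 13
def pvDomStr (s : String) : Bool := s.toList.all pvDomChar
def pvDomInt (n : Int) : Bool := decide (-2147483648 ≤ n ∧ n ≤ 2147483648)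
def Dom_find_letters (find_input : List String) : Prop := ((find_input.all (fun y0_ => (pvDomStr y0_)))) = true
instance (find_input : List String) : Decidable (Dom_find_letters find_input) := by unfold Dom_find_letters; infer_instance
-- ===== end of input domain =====

-- B replaces A's single accumulating dict scan with a divide-and-conquer recursion
-- (count each half, merge the count dicts by adding values; base case pairs adjacent
-- characters via zip).  Alternative decomposition; no speed claim.

-- ===== PORT A =====
def find_letters (find_input : List String) : List (String × Int) :=
  (find_input.foldl (fun d x =>
    if 3 ≤ PySem.Str.len x then
      (PySem.List.pyRange 0 (PySem.Str.len x - 1) 1).foldl (fun d i =>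
        if d.contains (PySem.Str.slice x (some i) (some (i + 2))) then
          d.insert (PySem.Str.slice x (some i) (some (i + 2)))
            (d.getD (PySem.Str.slice x (some i) (some (i + 2))) 0 + 1)
        else d.insert (PySem.Str.slice x (some i) (some (i + 2))) 1) d
    else d) PySem.Dict.empty).items

-- ===== PORT B =====
-- base case of Source B: one word's counts; Python's zip(word, word[1:]) over strings
-- yields character pairs, exact as List.zip of the char lists; 'a + b' on two
-- characters is the two-char string, exact as String.ofList [a, b].
def pvWordCount (word : String) : PySem.Dict String Int :=
  if 3 ≤ PySem.Str.len word then
    (word.toList.zip (PySem.Str.slice word (some 1) none).toList).foldl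
      (fun c p => c.insert (String.ofList [p.1, p.2]) (c.getD (String.ofList [p.1, p.2]) 0 + 1))
      PySem.Dict.empty
  else PySem.Dict.empty

-- Source B's recursion; find_input[:mid] / find_input[mid:] with 0 ≤ mid ≤ len and
-- mid = len // 2 (floor division of nonnegatives = Nat division) are exactly take/drop.
def pvDcCount : List String → PySem.Dict String Int
  | [] => PySem.Dict.empty
  | [word] => pvWordCount word
  | l@(_ :: _ :: _) =>
      (pvDcCount (l.drop (l.length / 2))).items.foldl
        (fun left p => left.insert p.1 (left.getD p.1 0 + p.2))
        (pvDcCount (l.take (l.length / 2)))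
termination_by l => l.length
decreasing_by
  · rename_i h; subst h; simp; omega
  · rename_i h; subst h; simp; omega

def find_letters_alt (find_input : List String) : List (String × Int) :=
  (pvDcCount find_input).items

-- ===== PRECONDITION & SPEC =====
def Spec_find_letters (find_input : List String) (out : List (String × Int)) : Prop := out = find_letters_alt find_input
instance (find_input : List String) (out : List (String × Int)) : Decidable (Spec_find_letters find_input out) := by unfold Spec_find_letters; infer_instance

-- ===== CLAIM (what is proved, stated in full; the proofs are below) =====
def Claim_equal_find_letters : Prop := ∀ (find_input : List String), Dom_find_letters find_input → Spec_find_letters find_input (find_letters find_input)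

-- ===== LEMMAS AND PROOFS =====

-- the bigrams of one word, as B forms them (adjacent-character pairs)
def pvPairs (x : String) : List String :=
  (x.toList.zip (PySem.Str.slice x (some 1) none).toList).map (fun p => String.ofList [p.1, p.2])

-- all bigrams of the input, word by word (words shorter than 3 contribute nothing)
def pvFlat (l : List String) : List String :=
  l.flatMap (fun x => if 3 ≤ PySem.Str.len x then pvPairs x else [])

-- adjacent length-2 windows of a list are its zip with its tail
theorem windows_eq_zip (cs : List Char) :
    (List.range (cs.length - 1)).map (fun k => (cs.drop k).take 2) =
      (cs.zip cs.tail).map (fun p => [p.1, p.2]) := by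
  induction cs with
  | nil => rfl
  | cons a cs ih =>
    cases cs with
    | nil => rfl
    | cons b cs' =>
      simp only [List.length_cons, Nat.add_sub_cancel, List.range_succ_eq_map,
        List.map_cons, List.map_map, List.zip_cons_cons, List.tail_cons]
      refine congrArg₂ _ rfl ?_
      have := ih
      simp only [List.length_cons, Nat.add_sub_cancel, List.tail_cons] at this
      rw [← this]
      exact List.map_congr_left (fun k _ => rfl)

-- A's per-word slices are B's zip pairs
theorem slices_eq_pairs (x : String) (h : 3 ≤ PySem.Str.len x) :
    (PySem.List.pyRange 0 (PySem.Str.len x - 1) 1).map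
      (fun i => PySem.Str.slice x (some i) (some (i + 2))) = pvPairs x := by
  rw [PySem.Str.len_eq] at h ⊢
  have hn : (↑x.toList.length - 1 : Int) = ((x.toList.length - 1 : Nat) : Int) := by
    have : 3 ≤ x.toList.length := by exact_mod_cast h
    omega
  rw [hn, PySem.List.pyRange_zero_natCast, List.map_map]
  have hslice : ∀ k : Nat, PySem.Str.slice x (some (k : Int)) (some ((k : Int) + 2)) =
      String.ofList ((x.toList.drop k).take 2) := by
    intro k
    simp only [PySem.Str.slice, PySem.Chars.slice]
    congr 1
    have h2 : ((k : Int) + 2) = ((k : Int) + ((2 : Nat) : Int)) := by norm_num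
    rw [h2, PySem.List.slice_natCast_add]
  have hL : ((fun i => PySem.Str.slice x (some i) (some (i + 2))) ∘ fun k : Nat => (k : Int)) =
      fun k : Nat => String.ofList ((x.toList.drop k).take 2) := by
    funext k; exact hslice k
  rw [hL]
  have htail : (PySem.Str.slice x (some 1) none).toList = x.toList.tail := by
    simp only [PySem.Str.slice, PySem.Chars.slice, String.toList_ofList]
    have h1 : ((1 : Int)) = ((1 : Nat) : Int) := rfl
    rw [h1, PySem.List.slice_from_natCast, List.drop_one]
  unfold pvPairs
  rw [htail]
  have hmm : (List.range (x.toList.length - 1)).map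
      (fun k => String.ofList ((x.toList.drop k).take 2)) =
      ((List.range (x.toList.length - 1)).map (fun k => (x.toList.drop k).take 2)).map
        String.ofList := by
    rw [List.map_map]; rfl
  rw [hmm, windows_eq_zip, List.map_map]
  rfl

-- A's conditional update is the unconditional counting step
theorem step_eq (d : PySem.Dict String Int) (k : String) :
    (if d.contains k then d.insert k (d.getD k 0 + 1) else d.insert k 1) =
      d.insert k (d.getD k 0 + 1) := by
  by_cases h : d.contains k = true
  · simp [h]
  · have h' : d.contains k = false := by simpa using h
    simp [h', PySem.Dict.getD_of_not_contains d 0 h']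

-- A's nested loops fused into one counting fold over the flat bigram list
theorem fold_flat (l : List String) (d : PySem.Dict String Int) :
    l.foldl (fun d x =>
      if 3 ≤ PySem.Str.len x then
        (PySem.List.pyRange 0 (PySem.Str.len x - 1) 1).foldl (fun d i =>
          if d.contains (PySem.Str.slice x (some i) (some (i + 2))) then
            d.insert (PySem.Str.slice x (some i) (some (i + 2)))
              (d.getD (PySem.Str.slice x (some i) (some (i + 2))) 0 + 1)
          else d.insert (PySem.Str.slice x (some i) (some (i + 2))) 1) d
      else d) d =
    (pvFlat l).foldl (fun d k => d.insert k (d.getD k 0 + 1)) d := by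
  induction l generalizing d with
  | nil => rfl
  | cons x t ih =>
    simp only [List.foldl_cons, pvFlat, List.flatMap_cons]
    by_cases h : 3 ≤ PySem.Str.len x
    · have hx : (PySem.List.pyRange 0 (PySem.Str.len x - 1) 1).foldl (fun d i =>
          if d.contains (PySem.Str.slice x (some i) (some (i + 2))) then
            d.insert (PySem.Str.slice x (some i) (some (i + 2)))
              (d.getD (PySem.Str.slice x (some i) (some (i + 2))) 0 + 1)
          else d.insert (PySem.Str.slice x (some i) (some (i + 2))) 1) d =
          (pvPairs x).foldl (fun d k => d.insert k (d.getD k 0 + 1)) d := by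
        rw [← slices_eq_pairs x h, List.foldl_map]
        exact PySem.List.foldl_congr_mem _ _ _ _ (fun acc i _ => step_eq acc _)
      rw [if_pos h, hx, ih]
      simp only [pvFlat, if_pos h, List.foldl_append]
    · rw [if_neg h, ih]
      simp only [pvFlat, if_neg h, List.nil_append]

-- a fold of value-adding inserts, read off at one key
theorem getD_foldl_insert_add (l : List (String × Int)) (d : PySem.Dict String Int) (k : String) :
    (l.foldl (fun d p => d.insert p.1 (d.getD p.1 0 + p.2)) d).getD k 0 =
      d.getD k 0 + (l.map (fun p => if p.1 = k then p.2 else 0)).sum := by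
  induction l generalizing d with
  | nil => simp
  | cons p l ih =>
    simp only [List.foldl_cons, List.map_cons, List.sum_cons, ih,
      PySem.Dict.getD_insert]
    by_cases hk : k = p.1
    · subst hk; simp; ring
    · rw [if_neg hk, if_neg (fun hh => hk hh.symm)]; ring

-- summing an indicator over a duplicate-free list
theorem sum_ite_nodup (X : List String) (v : String → Int) (k : String) (h : X.Nodup) :
    (X.map (fun a => if a = k then v a else 0)).sum = if k ∈ X then v k else 0 := by
  induction X with
  | nil => simp
  | cons a X ih =>
    simp only [List.nodup_cons] at h
    simp only [List.map_cons, List.sum_cons, ih h.2, List.mem_cons]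
    by_cases ha : a = k
    · subst ha
      simp [h.1]
    · have hk : ¬ k = a := fun hh => ha hh.symm
      simp [ha, hk]

-- merging a counter dict into d (B's merge loop) is counting its list into d
theorem merge_counter (bs : List String) (d : PySem.Dict String Int) (hd : d.keys.Nodup) :
    (PySem.Dict.counter bs).items.foldl (fun d p => d.insert p.1 (d.getD p.1 0 + p.2)) d =
      bs.foldl (fun d k => d.insert k (d.getD k 0 + 1)) d := by
  apply PySem.Dict.ext
  have hkL : ((PySem.Dict.counter bs).items.foldl
      (fun d p => d.insert p.1 (d.getD p.1 0 + p.2)) d).keys = PySem.Set.update d.keys bs := by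
    rw [PySem.Dict.keys_foldl_insert_key]
    have : (PySem.Dict.counter bs).items.map (fun p => p.1) = PySem.Set.ofList bs := by
      rw [← PySem.Dict.keys, PySem.Dict.keys_counter]
    rw [this, PySem.Set.update_eq_append_filter, PySem.Set.update_eq_append_filter,
      PySem.Set.ofList_ofList]
  have hkR : (bs.foldl (fun d k => d.insert k (d.getD k 0 + 1)) d).keys =
      PySem.Set.update d.keys bs := PySem.Dict.keys_foldl_insert _ _ _
  have hndL : ((PySem.Dict.counter bs).items.foldl
      (fun d p => d.insert p.1 (d.getD p.1 0 + p.2)) d).keys.Nodup :=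
    PySem.Dict.nodup_keys_foldl_insert_key _ _ _ _ hd
  have hndR : (bs.foldl (fun d k => d.insert k (d.getD k 0 + 1)) d).keys.Nodup :=
    PySem.Dict.nodup_keys_foldl_insert _ _ _ hd
  rw [PySem.Dict.items_eq_map_keys _ hndL 0, PySem.Dict.items_eq_map_keys _ hndR 0, hkL, hkR]
  refine List.map_congr_left (fun k _ => ?_)
  rw [PySem.Dict.getD_foldl_insert_add_one, getD_foldl_insert_add,
    PySem.Dict.items_counter, List.map_map]
  congr 1
  have : ((fun p => if p.1 = k then p.2 else 0) ∘ fun a => (a, (bs.count a : Int))) =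
      fun a => if a = k then (bs.count a : Int) else 0 := rfl
  rw [this, sum_ite_nodup _ _ _ (PySem.Set.nodup_ofList bs)]
  by_cases hm : k ∈ bs
  · rw [if_pos ((PySem.Set.mem_ofList bs k).mpr hm)]
  · rw [if_neg (fun hh => hm ((PySem.Set.mem_ofList bs k).mp hh)),
      List.count_eq_zero.mpr hm, Nat.cast_zero]

-- B's divide-and-conquer counts the flat bigram list
-- counting a concatenation is counting the second list into the first count
theorem counter_append (as bs : List String) :
    bs.foldl (fun d k => d.insert k (d.getD k 0 + 1)) (PySem.Dict.counter as) =
      PySem.Dict.counter (as ++ bs) := by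
  rw [← PySem.Dict.foldl_insert_getD_add_one_eq_counter,
    ← PySem.Dict.foldl_insert_getD_add_one_eq_counter, List.foldl_append]

-- B's divide-and-conquer counts the flat bigram list
theorem dc_eq_counter (l : List String) :
    pvDcCount l = PySem.Dict.counter (pvFlat l) := by
  induction l using pvDcCount.induct with
  | case1 => rw [pvDcCount]; rfl
  | case2 word =>
    rw [pvDcCount]
    unfold pvWordCount
    simp only [pvFlat, List.flatMap_cons, List.flatMap_nil, List.append_nil]
    by_cases h : 3 ≤ PySem.Str.len word
    · rw [if_pos h, if_pos h, ← PySem.Dict.foldl_insert_getD_add_one_eq_counter,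
        pvPairs, List.foldl_map]
    · rw [if_neg h, if_neg h]; rfl
  | case3 a b t ih1 ih2 =>
    rw [pvDcCount]
    rw [ih1, ih2, merge_counter _ _ (PySem.Dict.nodup_keys_counter _), counter_append]
    congr 1
    unfold pvFlat
    rw [← List.flatMap_append, List.take_append_drop]

-- ===== VERDICT (by name: the statement is the Claim_ definition above) =====
theorem find_letters_spec : Claim_equal_find_letters := by
  intro find_input _
  unfold Spec_find_letters find_letters find_letters_alt
  rw [fold_flat, PySem.Dict.foldl_insert_getD_add_one_eq_counter, dc_eq_counter]
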